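-- pv_equiv track=rewrite | github.com/CarlosGuzman01/tip102-course | unit 3/section 2/main2.py | blueprint_approval
-- ===== SOURCE A (Python) =====
-- import heapq
--
-- def blueprint_approval(blueprints):
--     extra = []
--
--
--     for n in blueprints:
--         if isinstance(n, int):
--             extra.append(n)
--
--     heapq.heapify(extra)
--
--     res = []
--     while extra:
--         res.append(heapq.heappop(extra))
--     return res
-- ===== SOURCE B (Python) =====
-- def blueprint_approval(blueprints):
--     return sorted(n for n in blueprints if isinstance(n, int))
-- ===== Notes on version B (the rewrite author's own statement) =====
-- stated objective: idiomatic
-- what changed: Replaces the explicit heapq-backed extraction (heapify plus a while/heappop loop into an accumulator) with a single library sorted() over a one-pass filter, removing the maintained priority queue entirely.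
import Mathlib
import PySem

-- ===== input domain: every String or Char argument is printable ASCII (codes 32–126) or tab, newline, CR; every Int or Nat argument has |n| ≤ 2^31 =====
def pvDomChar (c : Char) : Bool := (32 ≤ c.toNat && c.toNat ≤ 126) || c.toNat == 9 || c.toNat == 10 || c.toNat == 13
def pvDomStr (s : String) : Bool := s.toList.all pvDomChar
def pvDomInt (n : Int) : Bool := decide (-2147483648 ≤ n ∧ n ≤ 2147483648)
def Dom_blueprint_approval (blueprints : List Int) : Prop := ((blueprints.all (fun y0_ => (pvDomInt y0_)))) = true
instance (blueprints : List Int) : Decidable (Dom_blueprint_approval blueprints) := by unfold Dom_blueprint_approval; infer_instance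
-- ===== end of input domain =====

-- B replaces A's heapq heapify + while/heappop extraction with a one-pass filter fed to a single library sort (idiomatic; return value only).


-- ===== PORT A =====
-- The heapq library calls are ported by their contract, exact on Int return values:
-- heapify arranges `extra` into a min-heap and each heappop removes and returns the
-- current minimum, so the while loop appends the minimum of the remaining multiset
-- at every step (with equal Ints the popped VALUE is the same whichever copy the
-- heap yields, so removing the first occurrence is exact for the returned list).
def pvHeapPopLoop (extra : List Int) (res : List Int) : List Int :=
  match h : extra with
  | [] => res
  | x :: t =>
    match hm : PySem.List.min? (x :: t) (fun y => y) with
    | none => res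
    | some m =>
      match hr : PySem.List.remove? (x :: t) m with
      | none => res
      | some rest => pvHeapPopLoop rest (res ++ [m])
termination_by extra.length
decreasing_by
  have hmem : m ∈ x :: t := PySem.List.min?_mem hm
  have := PySem.List.remove?_eq_some_erase (x :: t) m hmem
  rw [this] at hr
  cases hr
  have hl := List.length_erase_of_mem hmem
  simp at hl ⊢
  omega

def blueprint_approval (blueprints : List Int) : List Int :=
  -- for n in blueprints: if isinstance(n, int): extra.append(n)   (the guard is identically true on List Int)
  let extra := blueprints.foldl (fun acc n => if true then acc ++ [n] else acc) []
  -- heapq.heapify(extra); res = []; while extra: res.append(heapq.heappop(extra))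
  pvHeapPopLoop extra []

-- ===== PORT B =====
def blueprint_approval_alt (blueprints : List Int) : List Int :=
  -- sorted(n for n in blueprints if isinstance(n, int)); the isinstance guard is identically true on List Int
  PySem.List.sorted (blueprints.filter (fun _ => true)) (fun x => x) false

-- ===== PRECONDITION & SPEC =====
def Spec_blueprint_approval (blueprints : List Int) (out : List Int) : Prop := out = blueprint_approval_alt blueprints
instance (blueprints : List Int) (out : List Int) : Decidable (Spec_blueprint_approval blueprints out) := by unfold Spec_blueprint_approval; infer_instance

-- ===== CLAIM (what is proved, stated in full; the proofs are below) =====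
def Claim_equal_blueprint_approval : Prop := ∀ (blueprints : List Int), Dom_blueprint_approval blueprints → Spec_blueprint_approval blueprints (blueprint_approval blueprints)

-- ===== LEMMAS AND PROOFS =====

theorem pvHeapPopLoop_eq_sorted (n : Nat) (extra res : List Int) (hn : extra.length ≤ n) :
    pvHeapPopLoop extra res = res ++ PySem.List.sorted extra (fun x => x) false := by
  induction n generalizing extra res with
  | zero =>
    have : extra = [] := List.length_eq_zero_iff.mp (Nat.le_zero.mp hn)
    subst this
    rw [pvHeapPopLoop.eq_def]
    simp [PySem.List.sorted_eq_nil_iff]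
  | succ k ih =>
    cases extra with
    | nil =>
      rw [pvHeapPopLoop.eq_def]
      simp [PySem.List.sorted_eq_nil_iff]
    | cons x t =>
      have hne : (x :: t : List Int) ≠ [] := by simp
      obtain ⟨m, hm⟩ : ∃ m, PySem.List.min? (x :: t) (fun y => y) = some m := by
        cases h : PySem.List.min? (x :: t) (fun y => y) with
        | none => exact absurd ((PySem.List.min?_eq_none_iff _ _).mp h) hne
        | some m => exact ⟨m, rfl⟩
      have hmem : m ∈ x :: t := PySem.List.min?_mem hm
      have hr : PySem.List.remove? (x :: t) m = some ((x :: t).erase m) :=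
        PySem.List.remove?_eq_some_erase (x :: t) m hmem
      have hlen : ((x :: t).erase m).length ≤ k := by
        have := List.length_erase_of_mem hmem
        simp at this hn ⊢
        omega
      rw [pvHeapPopLoop.eq_def]
      split
      case _ heq => simp at heq
      case _ x1 t1 heq =>
      cases heq
      split
      case _ heq => rw [hm] at heq; cases heq
      case _ m' heq =>
      rw [hm] at heq
      cases heq
      split
      case _ heq2 => rw [hr] at heq2; cases heq2
      case _ rest heq2 =>
      rw [hr] at heq2
      cases heq2
      rw [ih ((x :: t).erase m) (res ++ [m]) hlen]
      have hperm : (m :: (x :: t).erase m).Perm (x :: t) := (List.perm_cons_erase hmem).symm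
      have hsorted : PySem.List.sorted (x :: t) (fun x => x) false
          = m :: PySem.List.sorted ((x :: t).erase m) (fun x => x) false := by
        apply PySem.List.sorted_id_eq_of_perm_of_pairwise
        · exact ((PySem.List.sorted_perm _ _ _).cons m).trans hperm
        · refine List.Pairwise.cons ?_ ?_
          · intro y hy
            have hy' : y ∈ (x :: t).erase m := (PySem.List.mem_sorted _ _ _ _).mp hy
            exact PySem.List.min?_isMin hm y (List.mem_of_mem_erase hy')
          · simpa using PySem.List.sorted_pairwise ((x :: t).erase m) (fun x => x)
      rw [hsorted]
      simp

-- ===== VERDICT (by name: the statement is the Claim_ definition above) =====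
theorem blueprint_approval_spec : Claim_equal_blueprint_approval := by
  intro blueprints _
  unfold Spec_blueprint_approval blueprint_approval blueprint_approval_alt
  have hfold : blueprints.foldl (fun acc n => if true then acc ++ [n] else acc) [] = blueprints := by
    simp
    induction blueprints with
    | nil => rfl
    | cons x xs ih =>
      have h : ∀ (acc : List Int) (l : List Int), l.foldl (fun acc n => acc ++ [n]) acc = acc ++ l := by
        intro acc l
        induction l generalizing acc with
        | nil => simp
        | cons y ys ih2 => simp [List.foldl_cons, ih2]
      simpa using h [] (x :: xs)
  rw [hfold]
  rw [pvHeapPopLoop_eq_sorted blueprints.length blueprints [] le_rfl]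
  simp
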